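-- pv_equiv track=rewrite | github.com/dosaboy/basejmpr | basejmpr/cli.py | get_consumers_by_version
-- ===== SOURCE A (Python) =====
-- import collections
--
-- def get_consumers_by_version(consumers):
--     _c_by_v = {}
--     for img_path in consumers:
--         d = consumers[img_path]
--         ver = d.get('version')
--         if ver:
--             entry = {'image': img_path,
--                      'backing_file': d['backing_file']}
--             if ver in _c_by_v:
--                 _c_by_v[ver].append(entry)
--             else:
--                 _c_by_v[ver] = [entry]
--
--     return collections.OrderedDict(sorted(_c_by_v.items(),
--                                           key=lambda t: t[0]))
-- ===== SOURCE B (Python) =====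
-- import collections
--
-- def get_consumers_by_version(consumers):
--     versions = sorted({d.get('version')
--                        for d in consumers.values() if d.get('version')})
--     return collections.OrderedDict(
--         (v, [{'image': p, 'backing_file': d['backing_file']}
--              for p, d in consumers.items() if d.get('version') == v])
--         for v in versions)
-- ===== Notes on version B (the rewrite author's own statement) =====
-- stated objective: idiomatic
-- what changed: A groups entries into a dict keyed by version and then sorts the dict's items; B first computes the sorted set of distinct truthy versions and builds the result by one filtering comprehension per version, with no grouping dict at all.
import Mathlib
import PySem

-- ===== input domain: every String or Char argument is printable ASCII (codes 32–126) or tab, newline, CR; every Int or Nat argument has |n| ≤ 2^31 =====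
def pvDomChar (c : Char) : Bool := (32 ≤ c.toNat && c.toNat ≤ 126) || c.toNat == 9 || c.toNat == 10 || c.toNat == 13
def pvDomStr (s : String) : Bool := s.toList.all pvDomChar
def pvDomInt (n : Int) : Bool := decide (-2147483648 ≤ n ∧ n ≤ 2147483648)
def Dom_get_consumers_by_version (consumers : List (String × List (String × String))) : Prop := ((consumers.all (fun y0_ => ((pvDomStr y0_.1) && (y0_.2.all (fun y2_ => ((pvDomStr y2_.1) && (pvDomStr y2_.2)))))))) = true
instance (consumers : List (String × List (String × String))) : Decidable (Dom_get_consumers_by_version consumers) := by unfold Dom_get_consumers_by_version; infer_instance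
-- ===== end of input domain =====

-- B replaces A's hash-group-then-sort-the-items strategy by a sort-the-distinct-versions-
-- then-filter-per-version pass (objective: idiomatic/alternative; same observable value).

-- ===== PORT A =====
-- the entry dict {'image': img, 'backing_file': bf} (shared literal shape)
def pvEntry (img bf : String) : List (String × String) := [("image", img), ("backing_file", bf)]

-- the body of A's 'for img_path in consumers' loop (acc = _c_by_v); d['backing_file'] is
-- ported totally via .getD "" — exact under Pre_, which excludes the KeyError inputs
def pvStepA (acc : PySem.Dict String (List (List (String × String))))
    (kv : String × List (String × String)) : PySem.Dict String (List (List (String × String))) :=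
  let d := PySem.Dict.mk kv.2
  match d.get? "version" with
  | none => acc
  | some ver =>
    if ver = "" then acc
    else
      let entry := pvEntry kv.1 ((d.get? "backing_file").getD "")
      if acc.contains ver then
        acc.insert ver ((acc.get? ver).getD [] ++ [entry])   -- _c_by_v[ver].append(entry)
      else
        acc.insert ver [entry]

def get_consumers_by_version (consumers : List (String × List (String × String))) :
    List (String × List (List (String × String))) :=
  PySem.List.sorted (consumers.foldl pvStepA PySem.Dict.empty).items (fun t => t.1) false

-- ===== PORT B =====
-- d.get('version') of an inner dict
def pvVer? (dl : List (String × String)) : Option String := (PySem.Dict.mk dl).get? "version"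

-- the set comprehension {d.get('version') for d in consumers.values() if d.get('version')}
-- (as the list of truthy versions; PySem.Set.ofList below makes it the set)
def pvTvs (l : List (String × List (String × String))) : List String :=
  l.filterMap (fun kv =>
    match pvVer? kv.2 with
    | none => none
    | some v => if v = "" then none else some v)

-- the per-version list comprehension [entry for p, d in consumers.items() if d.get('version') == v]
def pvEnt (v : String) (l : List (String × List (String × String))) :
    List (List (String × String)) :=
  l.filterMap (fun kv =>
    if pvVer? kv.2 = some v then
      some (pvEntry kv.1 (((PySem.Dict.mk kv.2).get? "backing_file").getD ""))
    else none)

def get_consumers_by_version_alt (consumers : List (String × List (String × String))) :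
    List (String × List (List (String × String))) :=
  (PySem.List.sorted (PySem.Set.ofList (pvTvs consumers)) (fun v => v) false).map
    (fun v => (v, pvEnt v consumers))

-- ===== PRECONDITION & SPEC =====
-- Pre_ excludes (a) association lists with duplicate keys in the outer or an inner dict,
-- which a Python dict cannot carry (the duplicate-key corner is an artefact of the list
-- representation), and (b) inputs where some entry has a truthy version but no
-- 'backing_file' key, on which Python A raises KeyError.
def Pre_get_consumers_by_version (consumers : List (String × List (String × String))) : Prop :=
  (consumers.map Prod.fst).Nodup ∧
  ∀ kv ∈ consumers, (kv.2.map Prod.fst).Nodup ∧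
    (∀ v, pvVer? kv.2 = some v → v ≠ "" → "backing_file" ∈ kv.2.map Prod.fst)
instance (consumers : List (String × List (String × String))) : Decidable (Pre_get_consumers_by_version consumers) := by unfold Pre_get_consumers_by_version; infer_instance

def pvWitness_get_consumers_by_version : (List (String × List (String × String))) :=
  [("p1", [("version", "2"), ("backing_file", "b1")]),
   ("p2", [("version", "1"), ("backing_file", "b2")]),
   ("p3", [("version", "")])]

def Spec_get_consumers_by_version (consumers : List (String × List (String × String))) (out : List (String × List (List (String × String)))) : Prop := out = get_consumers_by_version_alt consumers
instance (consumers : List (String × List (String × String))) (out : List (String × List (List (String × String)))) : Decidable (Spec_get_consumers_by_version consumers out) := by unfold Spec_get_consumers_by_version; infer_instance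

-- ===== CLAIM (what is proved, stated in full; the proofs are below) =====
def Claim_equal_get_consumers_by_version : Prop := ∀ (consumers : List (String × List (String × String))), Dom_get_consumers_by_version consumers → Pre_get_consumers_by_version consumers → Spec_get_consumers_by_version consumers (get_consumers_by_version consumers)

-- ===== LEMMAS AND PROOFS =====

-- every truthy version is a nonempty string
theorem pvTvs_ne_empty (l : List (String × List (String × String))) (u : String)
    (hu : u ∈ pvTvs l) : u ≠ "" := by
  simp only [pvTvs, List.mem_filterMap] at hu
  obtain ⟨kv, -, h⟩ := hu
  cases hv : pvVer? kv.2 with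
  | none => simp [hv] at h
  | some v => rw [hv] at h; by_cases hvz : v = "" <;> simp [hvz] at h; exact h ▸ hvz

-- invariant of A's grouping loop: the dict's items are, in first-encounter order of the
-- distinct truthy versions, the pairs (version, all entries with that version)
theorem pvFold_items (l : List (String × List (String × String))) :
    (l.foldl pvStepA PySem.Dict.empty).items
      = (PySem.Set.ofList (pvTvs l)).map (fun v => (v, pvEnt v l)) := by
  induction l using List.reverseRecOn with
  | nil => rfl
  | append_singleton l x ih =>
    have hkeys : (l.foldl pvStepA PySem.Dict.empty).keys = PySem.Set.ofList (pvTvs l) := by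
      simp only [PySem.Dict.keys, ih]
      simp [Function.comp_def]
    have hnodk : (l.foldl pvStepA PySem.Dict.empty).keys.Nodup := by
      rw [hkeys]; exact PySem.Set.nodup_ofList _
    rw [List.foldl_append, List.foldl_cons, List.foldl_nil]
    set D := l.foldl pvStepA PySem.Dict.empty with hD
    simp only [pvStepA]
    cases hv : (PySem.Dict.mk x.2).get? "version" with
    | none =>
      simp only []
      have htv : pvTvs (l ++ [x]) = pvTvs l := by
        simp [pvTvs, List.filterMap_append, pvVer?, hv]
      have hent : ∀ u ∈ PySem.Set.ofList (pvTvs l),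
          pvEnt u (l ++ [x]) = pvEnt u l := by
        intro u hu; simp [pvEnt, List.filterMap_append, pvVer?, hv]
      rw [htv, List.map_congr_left (fun u hu => by rw [hent u hu] : _), ih]
    | some v =>
      simp only []
      by_cases hvz : v = ""
      · rw [if_pos hvz]
        have htv : pvTvs (l ++ [x]) = pvTvs l := by
          simp [pvTvs, List.filterMap_append, pvVer?, hv, hvz]
        have hent : ∀ u ∈ PySem.Set.ofList (pvTvs l),
            pvEnt u (l ++ [x]) = pvEnt u l := by
          intro u hu
          have hune : u ≠ "" := pvTvs_ne_empty l u ((PySem.Set.mem_ofList _ _).mp hu)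
          have hne : ¬ (pvVer? x.2 = some u) := by
            rw [pvVer?, hv]
            intro h
            exact hune (by injection h with h'; rw [← h', hvz])
          simp [pvEnt, List.filterMap_append, hne]
        rw [htv, List.map_congr_left (fun u hu => by rw [hent u hu] : _), ih]
      · rw [if_neg hvz]
        have htv : pvTvs (l ++ [x]) = pvTvs l ++ [v] := by
          simp [pvTvs, List.filterMap_append, pvVer?, hv, hvz]
        have hset : PySem.Set.ofList (pvTvs (l ++ [x]))
            = PySem.Set.add (PySem.Set.ofList (pvTvs l)) v := by
          rw [htv, PySem.Set.ofList_eq_foldl, List.foldl_append, ← PySem.Set.ofList_eq_foldl]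
          rfl
        have hentv : ∀ u, pvEnt u (l ++ [x])
            = pvEnt u l ++ (if pvVer? x.2 = some u then
                [pvEntry x.1 (((PySem.Dict.mk x.2).get? "backing_file").getD "")] else []) := by
          intro u
          simp only [pvEnt, List.filterMap_append]
          congr 1
          by_cases h : pvVer? x.2 = some u <;> simp [h]
        have hcont : D.contains v = decide (v ∈ PySem.Set.ofList (pvTvs l)) := by
          rw [PySem.Dict.contains_eq_decide_mem_keys, hkeys]
        by_cases hmem : v ∈ PySem.Set.ofList (pvTvs l)
        · rw [if_pos (by rw [hcont]; exact decide_eq_true hmem)]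
          have hget : D.get? v = some (pvEnt v l) := by
            exact PySem.Dict.get?_of_mem_items D
              (by rw [ih]; exact List.mem_map.mpr ⟨v, hmem, rfl⟩) hnodk
          rw [PySem.Dict.items_insert_of_contains D _ (by rw [hcont]; exact decide_eq_true hmem)]
          rw [ih, List.map_map, hset]
          have hadd : PySem.Set.add (PySem.Set.ofList (pvTvs l)) v
              = PySem.Set.ofList (pvTvs l) := by
            simp [PySem.Set.add, PySem.Set.contains, hmem]
          rw [hadd, hget]
          apply List.map_congr_left
          intro u hu
          by_cases huv : u = v
          · subst huv
            simp only [Function.comp_def, hentv, pvVer?, hv]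
            simp
          · have h1 : (u == v) = false := by simp [huv]
            have h2 : ¬ (pvVer? x.2 = some u) := by
              rw [pvVer?, hv]; intro h; exact huv (by injection h with h'; exact h'.symm)
            simp only [Function.comp_def, hentv, h1, if_neg h2]
            simp
        · rw [if_neg (by rw [hcont]; simp [hmem])]
          have hget : D.get? v = none := by
            rw [PySem.Dict.get?_eq_none_iff_not_mem_keys, hkeys]; exact hmem
          rw [PySem.Dict.items_insert_of_not_contains D _ (by rw [hcont]; simp [hmem])]
          rw [ih, hset]
          have hadd : PySem.Set.add (PySem.Set.ofList (pvTvs l)) v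
              = PySem.Set.ofList (pvTvs l) ++ [v] := by
            simp [PySem.Set.add, PySem.Set.contains, hmem]
          rw [hadd, List.map_append]
          congr 1
          · apply List.map_congr_left
            intro u hu
            have huv : u ≠ v := fun h => hmem (h ▸ hu)
            have h2 : ¬ (pvVer? x.2 = some u) := by
              rw [pvVer?, hv]; intro h; exact huv (by injection h with h'; exact h'.symm)
            rw [hentv]; simp [h2]
          · have hev : pvEnt v l = [] := by
              rw [pvEnt, List.filterMap_eq_nil_iff]
              intro kv hkv
              by_cases h : pvVer? kv.2 = some v
              · exact absurd ((PySem.Set.mem_ofList _ _).mpr (by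
                  simp only [pvTvs, List.mem_filterMap]
                  exact ⟨kv, hkv, by rw [h]; simp [hvz]⟩)) hmem
              · simp [h]
            simp only [List.map_cons, List.map_nil, hentv, hev, pvVer?, hv]
            simp

theorem get_consumers_by_version_spec : Claim_equal_get_consumers_by_version := by
  intro consumers _ _
  unfold Spec_get_consumers_by_version get_consumers_by_version get_consumers_by_version_alt
  rw [pvFold_items]
  refine PySem.List.sorted_eq_of_perm_of_pairwise_lt _ _ _ ?_ ?_
  · exact (PySem.List.sorted_perm _ _ _).map _
  · exact List.Pairwise.map _ (fun a b h => h)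
      (PySem.List.sorted_ofList_pairwise_lt (pvTvs consumers))
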